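-- pv_equiv track=rewrite | github.com/rush-srik/Jazz-AI | Model LB/Dictionary/pattern_shift.py | shift_pattern
-- ===== SOURCE A (Python) =====
-- def is_integer(x):
--     try:
--         int(x)
--     except ValueError:
--         return False
--     return True
--
-- def shift_pattern(pattern):
--     pattern = list(pattern)
--     degree_idx = [i for i, j in enumerate(pattern) if is_integer(j)]
--     degrees = [i for i in pattern if is_integer(i)]
--     output = f'{"".join(map(str, pattern))}\n'
--     for i in range(1, 7):
--         pattern_copy = pattern
--         new_degrees = [int(j)+i for j in degrees]
--         for j, k in enumerate(degree_idx):
--             pattern_copy.pop(k)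
--             pattern_copy.insert(k, new_degrees[j])
--         output += f'{"".join(map(str, pattern_copy))}\n'
--     return output
-- ===== SOURCE B (Python) =====
-- def is_integer(x):
--     try:
--         int(x)
--     except ValueError:
--         return False
--     return True
--
-- def shift_pattern(pattern):
--     pattern = list(pattern)
--     lines = ["".join(pattern)]
--     for i in range(1, 7):
--         lines.append("".join(str(int(x) + i) if is_integer(x) else x for x in pattern))
--     out = ""
--     for line in lines:
--         out += line + "\n"
--     return out
-- ===== Notes on version B (the rewrite author's own statement) =====
-- stated objective: simpler
-- what changed: B drops A's degree_idx/degrees index tables and the repeated in-place pop/insert mutation of a shared list; each shifted line is recomputed in one direct pass over the original pattern (shift the int-like elements, keep the rest), then the lines are concatenated.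
import Mathlib
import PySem

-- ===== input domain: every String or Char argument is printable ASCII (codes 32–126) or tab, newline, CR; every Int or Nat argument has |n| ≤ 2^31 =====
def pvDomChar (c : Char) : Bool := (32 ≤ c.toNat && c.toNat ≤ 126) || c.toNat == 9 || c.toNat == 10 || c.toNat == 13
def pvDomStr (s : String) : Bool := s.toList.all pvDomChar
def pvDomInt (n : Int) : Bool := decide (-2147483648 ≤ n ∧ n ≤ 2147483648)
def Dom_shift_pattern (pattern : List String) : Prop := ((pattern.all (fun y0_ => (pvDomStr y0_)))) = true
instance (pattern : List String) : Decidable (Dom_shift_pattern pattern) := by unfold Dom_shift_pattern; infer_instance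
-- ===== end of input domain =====

-- B drops A's degree_idx/degrees tables and in-place pop/insert mutation: each shifted line is
-- recomputed in one direct pass over the original pattern (objective: simpler; no speed claim).

-- ===== PORT A =====
-- is_integer(x): int(x) inside try/except ValueError
def is_integer (x : String) : Bool := (PySem.Int.ofStr? x).isSome

-- pattern_copy.pop(k); pattern_copy.insert(k, v).  The 'none' branch only makes the
-- function total (k is always in range when A runs it); Python would raise IndexError there.
def pvPopInsert (pc : List String) (k : Int) (v : String) : List String :=
  match PySem.List.pop? pc k with
  | some r => PySem.List.insert r.2 k v
  | none => pc

def shift_pattern (pattern : List String) : String :=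
  let pat := pattern                                     -- pattern = list(pattern)
  let degree_idx : List Int :=
    ((PySem.List.enumerate pat).filter (fun ij => is_integer ij.2)).map (fun ij => ij.1)
  let degrees : List String := pat.filter (fun s => is_integer s)
  let output := PySem.Str.join "" pat ++ "\n"
  let res := (PySem.List.pyRange 1 7 1).foldl (fun (st : List String × String) i =>
    let pc := st.1
    -- int(j) never fails on degrees (all int-like); getD 0 only makes the port total
    let new_degrees : List Int := degrees.map (fun j => (PySem.Int.ofStr? j).getD 0 + i)
    -- the inserted element is a Python int; str() is applied at join time, so we store str(v)
    let pc' := (PySem.List.enumerate degree_idx).foldl (fun pc jk =>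
        pvPopInsert pc jk.2 (PySem.Int.toStr ((PySem.List.pyGet? new_degrees jk.1).getD 0))) pc
    (pc', st.2 ++ (PySem.Str.join "" pc' ++ "\n"))) (pat, output)
  res.2

-- ===== PORT B =====
-- str(int(x) + i) if is_integer(x) else x
def pv_tf (i : Int) (x : String) : String :=
  if is_integer x then PySem.Int.toStr ((PySem.Int.ofStr? x).getD 0 + i) else x

def shift_line (pattern : List String) (i : Int) : String :=
  PySem.Str.join "" (pattern.map (pv_tf i))

def shift_pattern_alt (pattern : List String) : String :=
  let pat := pattern                                     -- pattern = list(pattern)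
  let lines := PySem.Str.join "" pat :: (PySem.List.pyRange 1 7 1).map (shift_line pat)
  lines.foldl (fun out line => out ++ (line ++ "\n")) ""

-- ===== PRECONDITION & SPEC =====
def Spec_shift_pattern (pattern : List String) (out : String) : Prop := out = shift_pattern_alt pattern
instance (pattern : List String) (out : String) : Decidable (Spec_shift_pattern pattern out) := by unfold Spec_shift_pattern; infer_instance

-- ===== CLAIM (what is proved, stated in full; the proofs are below) =====
def Claim_equal_shift_pattern : Prop := ∀ (pattern : List String), Dom_shift_pattern pattern → Spec_shift_pattern pattern (shift_pattern pattern)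

-- ===== LEMMAS AND PROOFS =====

-- b relates to a as a possibly re-shifted copy: at non-integer positions b still holds a's value
def pvRel (a b : String) : Prop := is_integer a = false → b = a

-- the (index, shifted-value) pairs A writes in its inner loop, as one list
def pvPairs (i : Int) (s : Int) (p : List String) : List (Int × Int) :=
  ((PySem.List.enumerate p s).filter (fun kx => is_integer kx.2)).map
    (fun kx => (kx.1, (PySem.Int.ofStr? kx.2).getD 0 + i))

lemma pvPopInsert_eq_set (pc : List String) (k : Nat) (v : String) (h : k < pc.length) :
    pvPopInsert pc (k : Int) v = pc.set k v := by
  unfold pvPopInsert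
  rw [PySem.List.pop?_natCast pc k h]
  show PySem.List.insert (pc.eraseIdx k) (k : Int) v = pc.set k v
  rw [PySem.List.insert_natCast _ k v (by rw [List.length_eraseIdx_of_lt h]; omega)]
  rw [List.eraseIdx_eq_take_drop_succ, List.set_eq_take_append_cons_drop, if_pos h]
  rw [List.take_append_of_le_length (by simp [List.length_take]; omega)]
  simp [List.take_take, List.length_take, Nat.le_of_lt h]

lemma pv_set_append_cons (qpre qsuf : List String) (b v : String) :
    (qpre ++ b :: qsuf).set qpre.length v = qpre ++ v :: qsuf := by
  induction qpre with
  | nil => rfl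
  | cons x xs ih => simp [ih]

-- folding A's inner loop = pointwise rewrite of the suffix
lemma pv_inner_eq (i : Int) :
    ∀ (p qsuf : List String), List.Forall₂ pvRel p qsuf → ∀ (qpre : List String),
    (pvPairs i (qpre.length : Int) p).foldl
        (fun q kv => pvPopInsert q kv.1 (PySem.Int.toStr kv.2)) (qpre ++ qsuf)
      = qpre ++ p.map (pv_tf i) := by
  intro p qsuf h
  induction h with
  | nil => intro qpre; simp [pvPairs, PySem.List.enumerate_nil]
  | @cons a b l₁ l₂ hab htail ih =>
    intro qpre
    rw [pvPairs, PySem.List.enumerate_cons, List.filter_cons]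
    cases hx : is_integer a
    · simp only [Bool.false_eq_true, if_false]
      have hba : b = a := hab hx
      have h1 : qpre ++ b :: l₂ = (qpre ++ [a]) ++ l₂ := by simp [hba]
      have h2 : ((qpre.length : Int) + 1) = (((qpre ++ [a]).length : Nat) : Int) := by
        simp
      rw [h1, h2, show ((List.filter (fun kx => is_integer kx.2)
            (PySem.List.enumerate l₁ ((((qpre ++ [a]).length : Nat)) : Int))).map
            (fun kx => (kx.1, (PySem.Int.ofStr? kx.2).getD 0 + i)))
          = pvPairs i (((qpre ++ [a]).length : Nat) : Int) l₁ from rfl]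
      rw [ih (qpre ++ [a])]
      simp [pv_tf, hx]
    · simp only [if_true, List.map_cons, List.foldl_cons]
      set v : String := PySem.Int.toStr ((PySem.Int.ofStr? a).getD 0 + i) with hv
      have hk : qpre.length < (qpre ++ b :: l₂).length := by simp
      rw [pvPopInsert_eq_set _ _ _ hk, pv_set_append_cons]
      have h1 : qpre ++ v :: l₂ = (qpre ++ [v]) ++ l₂ := by simp
      have h2 : ((qpre.length : Int) + 1) = (((qpre ++ [v]).length : Nat) : Int) := by
        simp
      rw [h1, h2, show ((List.filter (fun kx => is_integer kx.2)
            (PySem.List.enumerate l₁ ((((qpre ++ [v]).length : Nat)) : Int))).map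
            (fun kx => (kx.1, (PySem.Int.ofStr? kx.2).getD 0 + i)))
          = pvPairs i (((qpre ++ [v]).length : Nat) : Int) l₁ from rfl]
      rw [ih (qpre ++ [v])]
      simp [pv_tf, hx, hv]

-- indexing new_degrees[j] through enumerate = zipping the two lists
lemma pv_foldl_enum_index {σ : Type} (g : σ → Int → Int → σ) :
    ∀ (xs : List Int) (s : Nat) (vals : List Int) (acc : σ), s + xs.length ≤ vals.length →
    (PySem.List.enumerate xs (s : Int)).foldl
        (fun q jk => g q jk.2 ((PySem.List.pyGet? vals jk.1).getD 0)) acc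
      = (xs.zip (vals.drop s)).foldl (fun q p => g q p.1 p.2) acc := by
  intro xs
  induction xs with
  | nil => intro s vals acc h; simp [PySem.List.enumerate_nil]
  | cons x xs ih =>
    intro s vals acc h
    have hs : s < vals.length := by simp at h; omega
    rw [PySem.List.enumerate_cons, List.foldl_cons]
    rw [List.drop_eq_getElem_cons hs, List.zip_cons_cons, List.foldl_cons]
    have : ((s : Int) + 1) = ((s + 1 : Nat) : Int) := by push_cast; ring
    rw [this, ih (s + 1) vals _ (by simp at h ⊢; omega)]
    congr 1
    rw [PySem.List.pyGet?_natCast]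
    simp [hs]

lemma pv_zip_eq_pairs (i : Int) :
    ∀ (p : List String) (s : Int),
    ((((PySem.List.enumerate p s).filter (fun ij => is_integer ij.2)).map (fun ij => ij.1)).zip
        ((p.filter (fun s => is_integer s)).map (fun j => (PySem.Int.ofStr? j).getD 0 + i)))
      = pvPairs i s p := by
  intro p
  induction p with
  | nil => intro s; simp [pvPairs, PySem.List.enumerate_nil]
  | cons x xs ih =>
    intro s
    rw [pvPairs, PySem.List.enumerate_cons]
    cases hx : is_integer x
    · simp only [List.filter_cons, hx, Bool.false_eq_true, if_false]
      rw [ih (s + 1)]; rfl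
    · simp only [List.filter_cons, hx, if_true, List.map_cons, List.zip_cons_cons]
      rw [ih (s + 1)]; rfl

lemma pv_len_idx (p : List String) (s : Int) :
    (((PySem.List.enumerate p s).filter (fun ij => is_integer ij.2)).map (fun ij => ij.1)).length
      = (p.filter (fun s => is_integer s)).length := by
  induction p generalizing s with
  | nil => simp [PySem.List.enumerate_nil]
  | cons x xs ih =>
    rw [PySem.List.enumerate_cons]
    by_cases hx : is_integer x <;> simp [hx, ih]

lemma pv_rel_refl (p : List String) : List.Forall₂ pvRel p p := by
  induction p with
  | nil => exact List.Forall₂.nil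
  | cons x xs ih => exact List.Forall₂.cons (fun _ => rfl) ih

lemma pv_rel_tf (p : List String) (i : Int) : List.Forall₂ pvRel p (p.map (pv_tf i)) := by
  induction p with
  | nil => exact List.Forall₂.nil
  | cons x xs ih =>
    refine List.Forall₂.cons (fun h => ?_) ih
    simp [pv_tf, h]

-- A's inner loop on a related list q produces exactly B's line content
lemma pv_step_line (p q : List String) (i : Int) (h : List.Forall₂ pvRel p q) :
    (PySem.List.enumerate (((PySem.List.enumerate p).filter (fun ij => is_integer ij.2)).map (fun ij => ij.1))).foldl
      (fun pc jk => pvPopInsert pc jk.2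
        (PySem.Int.toStr ((PySem.List.pyGet?
          ((p.filter (fun s => is_integer s)).map (fun j => (PySem.Int.ofStr? j).getD 0 + i)) jk.1).getD 0))) q
    = p.map (pv_tf i) := by
  have hlen : (0:Nat) + (((PySem.List.enumerate p).filter (fun ij => is_integer ij.2)).map (fun ij => ij.1)).length
      ≤ ((p.filter (fun s => is_integer s)).map (fun j => (PySem.Int.ofStr? j).getD 0 + i)).length := by
    rw [pv_len_idx]; simp
  have hz := pv_foldl_enum_index (fun q k v => pvPopInsert q k (PySem.Int.toStr v))
    (((PySem.List.enumerate p).filter (fun ij => is_integer ij.2)).map (fun ij => ij.1)) 0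
    ((p.filter (fun s => is_integer s)).map (fun j => (PySem.Int.ofStr? j).getD 0 + i)) q hlen
  simp only [Nat.cast_zero, List.drop_zero] at hz
  rw [hz, pv_zip_eq_pairs]
  simpa using pv_inner_eq i p q h []

-- ===== VERDICT (by name: the statement is the Claim_ definition above) =====
theorem shift_pattern_spec : Claim_equal_shift_pattern := by
  intro pattern _
  show shift_pattern pattern = shift_pattern_alt pattern
  have hr : PySem.List.pyRange 1 7 1 = [1, 2, 3, 4, 5, 6] := by decide
  simp only [shift_pattern, shift_pattern_alt, hr, List.foldl_cons, List.foldl_nil,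
    List.map_cons, List.map_nil, shift_line]
  rw [pv_step_line pattern pattern 1 (pv_rel_refl pattern)]
  rw [pv_step_line pattern _ 2 (pv_rel_tf pattern 1)]
  rw [pv_step_line pattern _ 3 (pv_rel_tf pattern 2)]
  rw [pv_step_line pattern _ 4 (pv_rel_tf pattern 3)]
  rw [pv_step_line pattern _ 5 (pv_rel_tf pattern 4)]
  rw [pv_step_line pattern _ 6 (pv_rel_tf pattern 5)]
  simp [String.append_assoc]
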